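-- pv_equiv track=rewrite | github.com/yyd859/hw-kai-site | backend/runtime/tool_registry.py | _prune_unresolved_roles
-- ===== SOURCE A (Python) =====
-- from typing import Any
--
-- def _prune_unresolved_roles(unresolved_roles: list[dict[str, Any]], resolved_components: list[dict[str, Any]]) -> list[dict[str, Any]]:
--     resolved_roles = {str(item.get("role") or "").strip().lower() for item in resolved_components if str(item.get("role") or "").strip()}
--     resolved_capabilities = {
--         str(item.get("capability") or "").strip().lower() for item in resolved_components if str(item.get("capability") or "").strip()
--     }
--     pruned: list[dict[str, Any]] = []
--     for item in unresolved_roles: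
--         role = str(item.get("role") or "").strip().lower()
--         capability = str(item.get("capability") or "").strip().lower()
--         if role and role in resolved_roles:
--             continue
--         if capability and capability in resolved_capabilities:
--             continue
--         pruned.append(item)
--     return pruned
-- ===== SOURCE B (Python) =====
-- from typing import Any
--
-- def _prune_unresolved_roles(unresolved_roles: list[dict[str, Any]], resolved_components: list[dict[str, Any]]) -> list[dict[str, Any]]:
--     def norm(item: dict[str, Any], key: str) -> str:
--         return str(item.get(key) or "").strip().lower()
--
--     # Subtractive sieve: start from all unresolved items (with their normalized
--     # role/capability), and let each resolved component knock out its matches.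
--     remaining = [(item, norm(item, "role"), norm(item, "capability")) for item in unresolved_roles]
--     for comp in resolved_components:
--         rr = norm(comp, "role")
--         rc = norm(comp, "capability")
--         remaining = [t for t in remaining if not ((t[1] and t[1] == rr) or (t[2] and t[2] == rc))]
--     return [t[0] for t in remaining]
-- ===== Notes on version B (the rewrite author's own statement) =====
-- stated objective: alternative
-- what changed: Inverts the traversal into a subtractive sieve: instead of building sets of resolved roles/capabilities and filtering unresolved items against them, B makes the outer loop run over resolved_components, each pass deleting from a normalized working copy of unresolved_roles every item whose non-empty role or capability matches that component.
import Mathlib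
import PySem

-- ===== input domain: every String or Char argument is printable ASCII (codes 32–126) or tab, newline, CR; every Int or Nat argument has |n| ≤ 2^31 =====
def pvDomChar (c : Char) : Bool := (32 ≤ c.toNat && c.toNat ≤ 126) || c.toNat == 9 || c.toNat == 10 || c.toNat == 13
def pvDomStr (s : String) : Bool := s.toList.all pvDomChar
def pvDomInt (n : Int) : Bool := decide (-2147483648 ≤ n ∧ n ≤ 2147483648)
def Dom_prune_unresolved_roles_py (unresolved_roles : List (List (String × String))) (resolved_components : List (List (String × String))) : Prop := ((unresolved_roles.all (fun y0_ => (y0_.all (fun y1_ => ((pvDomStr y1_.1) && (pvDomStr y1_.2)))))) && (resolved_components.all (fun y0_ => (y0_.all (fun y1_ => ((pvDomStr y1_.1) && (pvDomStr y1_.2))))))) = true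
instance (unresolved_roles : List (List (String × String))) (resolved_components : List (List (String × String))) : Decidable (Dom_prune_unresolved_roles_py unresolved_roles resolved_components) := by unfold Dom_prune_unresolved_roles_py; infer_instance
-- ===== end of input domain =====

-- B inverts the traversal into a subtractive sieve: the outer loop runs over
-- resolved_components, each pass deleting matching items from a normalized
-- working copy of unresolved_roles (alternative decomposition; same results).

-- shared primitive of both Pythons: str(item.get(key) or "").strip()
def pvRawStrip (key : String) (item : List (String × String)) : String :=
  PySem.Str.strip ((PySem.Dict.ofList item).getD key "")

-- ... and its .lower()
def pvNorm (key : String) (item : List (String × String)) : String :=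
  PySem.Str.lower (pvRawStrip key item)

-- ===== PORT A =====
def prune_unresolved_roles_py (unresolved_roles : List (List (String × String))) (resolved_components : List (List (String × String))) : List (List (String × String)) :=
  let resolved_roles : PySem.Set String :=
    PySem.Set.ofList ((resolved_components.filter (fun it => pvRawStrip "role" it != "")).map (pvNorm "role"))
  let resolved_capabilities : PySem.Set String :=
    PySem.Set.ofList ((resolved_components.filter (fun it => pvRawStrip "capability" it != "")).map (pvNorm "capability"))
  unresolved_roles.foldl (fun pruned item =>
    let role := pvNorm "role" item
    let capability := pvNorm "capability" item
    if role ≠ "" ∧ role ∈ resolved_roles then pruned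
    else if capability ≠ "" ∧ capability ∈ resolved_capabilities then pruned
    else pruned ++ [item]) []

-- ===== PORT B =====
def prune_unresolved_roles_py_alt (unresolved_roles : List (List (String × String))) (resolved_components : List (List (String × String))) : List (List (String × String)) :=
  let init := unresolved_roles.map (fun item => (item, pvNorm "role" item, pvNorm "capability" item))
  let remaining := resolved_components.foldl (fun rem comp =>
    let rr := pvNorm "role" comp
    let rc := pvNorm "capability" comp
    rem.filter (fun t => !((t.2.1 != "" && t.2.1 == rr) || (t.2.2 != "" && t.2.2 == rc)))) init
  remaining.map Prod.fst

-- ===== PRECONDITION & SPEC =====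
def Spec_prune_unresolved_roles_py (unresolved_roles : List (List (String × String))) (resolved_components : List (List (String × String))) (out : List (List (String × String))) : Prop := out = prune_unresolved_roles_py_alt unresolved_roles resolved_components
instance (unresolved_roles : List (List (String × String))) (resolved_components : List (List (String × String))) (out : List (List (String × String))) : Decidable (Spec_prune_unresolved_roles_py unresolved_roles resolved_components out) := by unfold Spec_prune_unresolved_roles_py; infer_instance

-- ===== CLAIM (what is proved, stated in full; the proofs are below) =====
def Claim_equal_prune_unresolved_roles_py : Prop := ∀ (unresolved_roles : List (List (String × String))) (resolved_components : List (List (String × String))), Dom_prune_unresolved_roles_py unresolved_roles resolved_components → Spec_prune_unresolved_roles_py unresolved_roles resolved_components (prune_unresolved_roles_py unresolved_roles resolved_components)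

-- ===== LEMMAS AND PROOFS =====

-- A's set-membership test (non-empty guard + set built from strip-nonempty components)
-- equals a direct any-scan of the components with the same guard.
theorem pvCond_iff (key : String) (role : String) (r : List (List (String × String))) :
    (role ≠ "" ∧ role ∈ PySem.Set.ofList ((r.filter (fun it => pvRawStrip key it != "")).map (pvNorm key)))
      ↔ (role != "" && r.any (fun it => role == pvNorm key it)) = true := by
  rw [PySem.Set.mem_ofList]
  simp only [Bool.and_eq_true, bne_iff_ne, ne_eq, List.any_eq_true, beq_iff_eq,
    List.mem_map, List.mem_filter]
  constructor
  · rintro ⟨hne, it, ⟨hmem, _⟩, hval⟩; exact ⟨hne, it, hmem, hval.symm⟩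
  · rintro ⟨hne, it, hmem, hval⟩
    refine ⟨hne, it, ⟨hmem, ?_⟩, hval.symm⟩
    intro hraw
    apply hne
    rw [hval, pvNorm, hraw]
    rfl

-- A's loop body written as a guarded append with the scan-form of the condition.
theorem pvBody_eq (r : List (List (String × String))) :
    (fun (pruned : List (List (String × String))) item =>
      let role := pvNorm "role" item
      let capability := pvNorm "capability" item
      if role ≠ "" ∧ role ∈ PySem.Set.ofList ((r.filter (fun it => pvRawStrip "role" it != "")).map (pvNorm "role")) then pruned
      else if capability ≠ "" ∧ capability ∈ PySem.Set.ofList ((r.filter (fun it => pvRawStrip "capability" it != "")).map (pvNorm "capability")) then pruned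
      else pruned ++ [item])
    = (fun pruned item =>
      if (!((pvNorm "role" item != "" && r.any (fun it => pvNorm "role" item == pvNorm "role" it)) ||
            (pvNorm "capability" item != "" && r.any (fun it => pvNorm "capability" item == pvNorm "capability" it)))) = true
      then pruned ++ [item] else pruned) := by
  funext pruned item
  simp only [pvCond_iff]
  cases hb1 : (pvNorm "role" item != "" && r.any (fun it => pvNorm "role" item == pvNorm "role" it)) <;>
    cases hb2 : (pvNorm "capability" item != "" && r.any (fun it => pvNorm "capability" item == pvNorm "capability" it)) <;>
    simp

-- A fold of filters is the filter by the conjunction over all fold steps.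
theorem pvFoldl_filter {α β : Type} (q : β → α → Bool) (rs : List β) (init : List α) :
    rs.foldl (fun acc c => acc.filter (q c)) init
      = init.filter (fun x => rs.all (fun c => q c x)) := by
  induction rs generalizing init with
  | nil => simp
  | cons c rs ih =>
    simp only [List.foldl_cons, ih, List.filter_filter, List.all_cons]
    exact List.filter_congr (fun x _ => Bool.and_comm _ _)

-- Filtering a map by the first-projection-preserving tagging, then projecting.
theorem pvMap_fst_filter {α β : Type} (g : α → β) (p : α × β → Bool) (u : List α) :
    ((u.map (fun x => (x, g x))).filter p).map Prod.fst
      = u.filter (fun x => p (x, g x)) := by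
  induction u with
  | nil => rfl
  | cons a u ih =>
    simp only [List.map_cons, List.filter_cons]
    by_cases h : p (a, g a) = true
    · simp [h, ih]
    · simp [h, ih]

-- The sieve's survival condition equals the negated disjunction of the two scans.
theorem pvKeep_eq (r : List (List (String × String))) (role cap : String) :
    r.all (fun c => !((role != "" && role == pvNorm "role" c) || (cap != "" && cap == pvNorm "capability" c)))
      = !((role != "" && r.any (fun c => role == pvNorm "role" c)) ||
          (cap != "" && r.any (fun c => cap == pvNorm "capability" c))) := by
  induction r with
  | nil => simp
  | cons c r ih =>
    simp only [List.all_cons, List.any_cons, ih]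
    cases role != "" <;> cases cap != "" <;>
      cases hb : role == pvNorm "role" c <;> cases hc : cap == pvNorm "capability" c <;> simp

-- ===== VERDICT (by name: the statement is the Claim_ definition above) =====
theorem prune_unresolved_roles_py_spec : Claim_equal_prune_unresolved_roles_py := by
  intro u r _
  unfold Spec_prune_unresolved_roles_py
  show (u.foldl (fun pruned item =>
      let role := pvNorm "role" item
      let capability := pvNorm "capability" item
      if role ≠ "" ∧ role ∈ PySem.Set.ofList ((r.filter (fun it => pvRawStrip "role" it != "")).map (pvNorm "role")) then pruned
      else if capability ≠ "" ∧ capability ∈ PySem.Set.ofList ((r.filter (fun it => pvRawStrip "capability" it != "")).map (pvNorm "capability")) then pruned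
      else pruned ++ [item]) [])
    = prune_unresolved_roles_py_alt u r
  rw [pvBody_eq r, PySem.List.foldl_append_if_eq_filter]
  show u.filter _ = prune_unresolved_roles_py_alt u r
  unfold prune_unresolved_roles_py_alt
  simp only [pvFoldl_filter, pvMap_fst_filter]
  refine (List.filter_congr ?_).symm
  intro item _
  exact pvKeep_eq r (pvNorm "role" item) (pvNorm "capability" item)
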